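-- pv_equiv track=rewrite | github.com/hsmtkk/fuzzy-giggle | factorycheck/factorycheck.py | solve
-- ===== SOURCE A (Python) =====
-- def solve(expected: list[int], input: list[int]) -> bool:
--     counter: dict[int, int] = dict()
--     for n in input:
--         count = counter.get(n, 0)
--         counter[n] = count + 1
--     for n in expected:
--         count = counter.get(n, 0)
--         if count == 0:
--             return False
--         counter[n] = count - 1
--     return True
-- ===== SOURCE B (Python) =====
-- def solve(expected: list[int], input: list[int]) -> bool:
--     # multiset inclusion by direct per-value count comparison (no imports in A's module)
--     return all(expected.count(x) <= input.count(x) for x in set(expected))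
-- ===== Notes on version B (the rewrite author's own statement) =====
-- stated objective: simpler
-- what changed: A builds one mutable frequency dict from input and walks expected decrementing it with an early return; B has no dict and no decrement loop: it compares per-value occurrence counts directly over the distinct expected values.
import Mathlib
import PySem

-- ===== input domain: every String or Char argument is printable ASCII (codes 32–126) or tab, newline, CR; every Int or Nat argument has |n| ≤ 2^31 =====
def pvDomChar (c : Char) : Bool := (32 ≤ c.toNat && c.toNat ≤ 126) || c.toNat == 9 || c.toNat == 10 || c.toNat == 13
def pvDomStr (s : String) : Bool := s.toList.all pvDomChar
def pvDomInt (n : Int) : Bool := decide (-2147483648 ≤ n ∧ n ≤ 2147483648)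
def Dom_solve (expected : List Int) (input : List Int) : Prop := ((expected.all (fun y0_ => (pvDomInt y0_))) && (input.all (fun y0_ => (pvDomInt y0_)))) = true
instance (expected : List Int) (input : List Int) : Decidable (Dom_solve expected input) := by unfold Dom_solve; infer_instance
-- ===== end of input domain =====

-- B replaces A's mutable counting dict + decrementing early-return loop by a direct
-- per-value count comparison over the distinct expected values (simpler; not faster).

-- ===== PORT A =====
-- the second loop of A: walk expected, decrement, early return False on a zero count
def solveLoopA : List Int → PySem.Dict Int Int → Bool
  | [], _ => true
  | n :: rest, counter =>
    let count := counter.getD n 0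
    if count == 0 then false
    else solveLoopA rest (counter.insert n (count - 1))

def solve (expected : List Int) (input : List Int) : Bool :=
  let counter := input.foldl (fun d n => let count := d.getD n 0; d.insert n (count + 1)) PySem.Dict.empty
  solveLoopA expected counter

-- ===== PORT B =====
def solve_alt (expected : List Int) (input : List Int) : Bool :=
  (PySem.Set.ofList expected).all
    (fun x => decide (PySem.List.count expected x ≤ PySem.List.count input x))

-- ===== PRECONDITION & SPEC =====
def Spec_solve (expected : List Int) (input : List Int) (out : Bool) : Prop := out = solve_alt expected input
instance (expected : List Int) (input : List Int) (out : Bool) : Decidable (Spec_solve expected input out) := by unfold Spec_solve; infer_instance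

-- ===== CLAIM (what is proved, stated in full; the proofs are below) =====
def Claim_equal_solve : Prop := ∀ (expected : List Int) (input : List Int), Dom_solve expected input → Spec_solve expected input (solve expected input)

-- ===== LEMMAS AND PROOFS =====

-- characterisation of A's decrement loop: it succeeds iff every value occurs in
-- `es` at most as often as the counter says.
theorem solveLoopA_eq_true_iff (es : List Int) (d : PySem.Dict Int Int)
    (hnn : ∀ x, 0 ≤ d.getD x 0) :
    solveLoopA es d = true ↔ ∀ x, (es.count x : Int) ≤ d.getD x 0 := by
  induction es generalizing d with
  | nil =>
    simp only [solveLoopA, List.count_nil, Int.natCast_zero, true_iff]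
    exact hnn
  | cons n rest ih =>
    simp only [solveLoopA]
    by_cases h0 : d.getD n 0 = 0
    · simp only [h0, beq_self_eq_true, if_true]
      constructor
      · intro h; cases h
      · intro h
        have := h n
        simp [List.count_cons_self, h0] at this
        omega
    · have hk : 1 ≤ d.getD n 0 := by have := hnn n; omega
      have hnn' : ∀ x, 0 ≤ (d.insert n (d.getD n 0 - 1)).getD x 0 := by
        intro x
        rw [PySem.Dict.getD_insert]
        by_cases hxn : x = n
        · simp only [if_pos hxn]; omega
        · simp only [if_neg hxn]; exact hnn x
      simp only [beq_iff_eq, h0, if_false, ih _ hnn']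
      refine forall_congr' (fun x => ?_)
      rw [PySem.Dict.getD_insert]
      by_cases hxn : x = n
      · subst hxn
        simp [List.count_cons_self]
      · have : n ≠ x := fun h => hxn h.symm
        simp only [if_neg hxn, List.count_cons_of_ne this]

theorem solve_alt_eq_true_iff (expected input : List Int) :
    solve_alt expected input = true ↔ ∀ x, expected.count x ≤ input.count x := by
  unfold solve_alt
  rw [List.all_eq_true]
  constructor
  · intro h x
    by_cases hx : x ∈ expected
    · have := h x ((PySem.Set.mem_ofList expected x).mpr hx)
      simpa [PySem.List.count] using this
    · simp [List.count_eq_zero_of_not_mem hx]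
  · intro h x hx
    simpa [PySem.List.count] using h x

-- ===== VERDICT (by name: the statement is the Claim_ definition above) =====
theorem solve_spec : Claim_equal_solve := by
  intro expected input _
  unfold Spec_solve solve
  simp only []
  have hA : solveLoopA expected
      (input.foldl (fun d n => let count := d.getD n 0; d.insert n (count + 1)) PySem.Dict.empty)
      = true ↔ ∀ x, expected.count x ≤ input.count x := by
    rw [solveLoopA_eq_true_iff _ _ (fun x => by
      rw [PySem.Dict.getD_foldl_insert_add_one, PySem.Dict.getD_empty]; omega)]
    constructor
    · intro h x
      have := h x
      rw [PySem.Dict.getD_foldl_insert_add_one, PySem.Dict.getD_empty] at this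
      omega
    · intro h x
      rw [PySem.Dict.getD_foldl_insert_add_one, PySem.Dict.getD_empty]
      have := h x
      omega
  have hB := solve_alt_eq_true_iff expected input
  cases hA' : solveLoopA expected
      (input.foldl (fun d n => let count := d.getD n 0; d.insert n (count + 1)) PySem.Dict.empty) with
  | true =>
    exact (hB.mpr (hA.mp hA')).symm
  | false =>
    cases hB' : solve_alt expected input with
    | true => exact absurd (hA.mpr (hB.mp hB')) (by simp [hA'])
    | false => rfl
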